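-- pv_equiv track=rewrite | github.com/Turistta/tripestimator | src/models/utils_models.py | decode_single_coordinate
-- ===== SOURCE A (Python) =====
-- def decode_single_coordinate(polyline: str, index: int) -> tuple[int, int]:
--     result, shift, b = 0, 0, 0
--     while True:
--         b = ord(polyline[index]) - 63
--         index += 1
--         result |= (b & 0x1F) << shift
--         shift += 5
--         if b < 0x20:
--             break
--     return index, ~(result >> 1) if (result & 1) else (result >> 1)
-- ===== SOURCE B (Python) =====
-- def decode_single_coordinate(polyline: str, index: int) -> tuple[int, int]:
--     # Pass 1: locate the terminating byte of this varint (continuation bit clear).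
--     end = index
--     while ord(polyline[end]) >= 95:
--         end += 1
--     # Pass 2: walk backwards from the end byte, folding chunks big-endian.
--     result = 0
--     j = end
--     while j >= index:
--         result = (result << 5) | ((ord(polyline[j]) - 63) & 0x1F)
--         j -= 1
--     # Closed-form zigzag decode.
--     return end + 1, (result >> 1) ^ -(result & 1)
-- ===== Notes on version B (the rewrite author's own statement) =====
-- stated objective: alternative
-- what changed: A decodes in one forward accumulate-in-place loop ORing each 5-bit group into the result at a running shift and branching for the zigzag sign; B carries no accumulator or shift at all: pass 1 only locates the varint's terminating byte, pass 2 walks backwards from it folding chunks big-endian (result = (result << 5) | chunk), and the zigzag decode is the closed form (result >> 1) ^ -(result & 1).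
import Mathlib
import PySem

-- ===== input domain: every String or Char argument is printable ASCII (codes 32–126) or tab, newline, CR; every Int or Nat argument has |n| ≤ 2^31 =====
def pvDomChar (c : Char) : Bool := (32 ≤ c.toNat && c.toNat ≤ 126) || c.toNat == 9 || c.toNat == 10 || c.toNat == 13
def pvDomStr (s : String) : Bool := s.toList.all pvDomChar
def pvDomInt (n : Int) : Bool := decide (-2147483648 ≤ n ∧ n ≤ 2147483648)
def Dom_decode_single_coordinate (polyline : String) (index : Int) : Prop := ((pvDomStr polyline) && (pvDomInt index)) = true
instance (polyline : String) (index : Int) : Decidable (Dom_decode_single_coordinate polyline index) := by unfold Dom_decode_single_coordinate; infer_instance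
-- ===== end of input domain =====

-- B replaces A's single forward accumulate-at-a-running-shift loop by a scan that only
-- locates the varint's terminating byte, a backwards big-endian combine from that byte,
-- and a closed-form zigzag; equal return value on all of Pre_ (where A returns).

-- ===== PORT A =====
-- A's while-loop: reads polyline[index] (negative index wraps, as in Python), ORs the low
-- 5 bits into result at the current shift, advances index, stops when b < 0x20.
-- none = the iteration where Python raises IndexError (excluded by Pre_).
def pvDecodeA_loop (cs : List Char) (index result : Int) (shift : Nat) : Option (Int × Int) :=
  match h : PySem.List.pyGet? cs index with
  | none => none
  | some c =>
    let b : Int := (c.toNat : Int) - 63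
    if b < 32 then
      some (index + 1, PySem.Int.bor result ((PySem.Int.band b 31) <<< shift))
    else
      pvDecodeA_loop cs (index + 1) (PySem.Int.bor result ((PySem.Int.band b 31) <<< shift)) (shift + 5)
termination_by (cs.length + 1 - index).toNat
decreasing_by
  have hin : PySem.Raise.InRange cs.length index := by
    by_contra hc
    rw [← PySem.List.pyGet?_eq_none_iff (xs := cs) (i := index)] at hc
    simp [hc] at h
  unfold PySem.Raise.InRange at hin
  omega

-- Python's `~(result >> 1) if (result & 1) else (result >> 1)`
def pvZigA (r : Int) : Int :=
  if PySem.Int.band r 1 ≠ 0 then Int.not (r >>> (1 : Nat)) else r >>> (1 : Nat)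

def decode_single_coordinate (polyline : String) (index : Int) : Int × Int :=
  match pvDecodeA_loop polyline.toList index 0 0 with
  | none => (0, 0)            -- Python raises IndexError here; excluded by Pre_
  | some (i', r) => (i', pvZigA r)

-- ===== PORT B =====
-- Pass 1 of Source B: `while ord(polyline[end]) >= 95: end += 1` — returns the position of the
-- terminating byte, carrying nothing else (none = IndexError).
def pvFindEnd (cs : List Char) (j : Int) : Option Int :=
  match h : PySem.List.pyGet? cs j with
  | none => none
  | some c => if 95 ≤ c.toNat then pvFindEnd cs (j + 1) else some j
termination_by (cs.length + 1 - j).toNat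
decreasing_by
  have hin : PySem.Raise.InRange cs.length j := by
    by_contra hc
    rw [← PySem.List.pyGet?_eq_none_iff (xs := cs) (i := j)] at hc
    simp [hc] at h
  unfold PySem.Raise.InRange at hin
  omega

-- Pass 2 of Source B: `while j >= index: result = (result << 5) | ((ord(polyline[j]) - 63) & 0x1F); j -= 1`
def pvCombDown (cs : List Char) (j lo r : Int) : Option Int :=
  if lo ≤ j then
    match PySem.List.pyGet? cs j with
    | none => none
    | some c =>
      pvCombDown cs (j - 1) lo (PySem.Int.bor (r <<< (5 : Nat)) (PySem.Int.band ((c.toNat : Int) - 63) 31))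
  else some r
termination_by (j - lo + 1).toNat
decreasing_by omega

def decode_single_coordinate_alt (polyline : String) (index : Int) : Int × Int :=
  match pvFindEnd polyline.toList index with
  | none => (0, 0)            -- Python raises IndexError here; excluded by Pre_
  | some e =>
    match pvCombDown polyline.toList e index 0 with
    | none => (0, 0)          -- unreachable when pass 1 succeeded; IndexError otherwise
    | some r => (e + 1, PySem.Int.bxor (r >>> (1 : Nat)) (-(PySem.Int.band r 1)))

-- ===== PRECONDITION & SPEC =====
-- Exactly the inputs on which Python A returns: the walk from index (after Python's
-- negative-index wrap) meets a byte with the continuation bit clear (ord < 95) before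
-- running off the end; everywhere else A raises IndexError.
def Pre_decode_single_coordinate (polyline : String) (index : Int) : Prop :=
  (0 ≤ index ∧ index < polyline.toList.length ∧
    ((polyline.toList.drop index.toNat).any (fun c => decide (c.toNat < 95))) = true) ∨
  (-(polyline.toList.length : Int) ≤ index ∧ index < 0 ∧
    (polyline.toList.any (fun c => decide (c.toNat < 95))) = true)
instance (polyline : String) (index : Int) : Decidable (Pre_decode_single_coordinate polyline index) := by unfold Pre_decode_single_coordinate; infer_instance

def pvWitness_decode_single_coordinate : String × Int := ("_p~iF", 1)

def Spec_decode_single_coordinate (polyline : String) (index : Int) (out : Int × Int) : Prop := out = decode_single_coordinate_alt polyline index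
instance (polyline : String) (index : Int) (out : Int × Int) : Decidable (Spec_decode_single_coordinate polyline index out) := by unfold Spec_decode_single_coordinate; infer_instance

-- ===== CLAIM (what is proved, stated in full; the proofs are below) =====
def Claim_equal_decode_single_coordinate : Prop := ∀ (polyline : String) (index : Int), Dom_decode_single_coordinate polyline index → Pre_decode_single_coordinate polyline index → Spec_decode_single_coordinate polyline index (decode_single_coordinate polyline index)

-- ===== LEMMAS AND PROOFS =====

-- nonnegativity facts
lemma pv_bor_nonneg {a b : Int} (ha : 0 ≤ a) (hb : 0 ≤ b) : 0 ≤ PySem.Int.bor a b := by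
  rw [PySem.Int.bor_of_nonneg ha hb]; positivity

lemma pv_shl_nonneg {a : Int} (n : Nat) (ha : 0 ≤ a) : 0 ≤ a <<< n := by
  rw [Int.shiftLeft_eq]; positivity

lemma pv_band31_nonneg (b : Int) : 0 ≤ PySem.Int.band b 31 := by
  rw [PySem.Int.band_comm]
  exact PySem.Int.band_nonneg_of_nonneg_left b (by norm_num)

-- OR algebra on nonnegative integers (via the Nat bitwise layer)
lemma pv_bor_zero_left (a : Int) : PySem.Int.bor 0 a = a := by
  rw [PySem.Int.bor_comm, PySem.Int.bor_zero]

lemma pv_natCast_shl (x : Nat) (n : Nat) : ((x : Int) <<< n) = ((x <<< n : Nat) : Int) := by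
  rw [Int.shiftLeft_eq, Nat.shiftLeft_eq]; push_cast; ring

lemma pv_bor_shl {a b : Int} (ha : 0 ≤ a) (hb : 0 ≤ b) (n : Nat) :
    (PySem.Int.bor a b) <<< n = PySem.Int.bor (a <<< n) (b <<< n) := by
  obtain ⟨x, rfl⟩ : ∃ x : Nat, a = (x : Int) := ⟨a.toNat, (Int.toNat_of_nonneg ha).symm⟩
  obtain ⟨y, rfl⟩ : ∃ y : Nat, b = (y : Int) := ⟨b.toNat, (Int.toNat_of_nonneg hb).symm⟩
  rw [PySem.Int.bor_natCast, pv_natCast_shl, pv_natCast_shl, pv_natCast_shl,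
    PySem.Int.bor_natCast, Nat.shiftLeft_or_distrib]

lemma pv_bor_assoc {a b c : Int} (ha : 0 ≤ a) (hb : 0 ≤ b) (hc : 0 ≤ c) :
    PySem.Int.bor (PySem.Int.bor a b) c = PySem.Int.bor a (PySem.Int.bor b c) := by
  obtain ⟨x, rfl⟩ : ∃ x : Nat, a = (x : Int) := ⟨a.toNat, (Int.toNat_of_nonneg ha).symm⟩
  obtain ⟨y, rfl⟩ : ∃ y : Nat, b = (y : Int) := ⟨b.toNat, (Int.toNat_of_nonneg hb).symm⟩
  obtain ⟨z, rfl⟩ : ∃ z : Nat, c = (z : Int) := ⟨c.toNat, (Int.toNat_of_nonneg hc).symm⟩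
  simp only [PySem.Int.bor_natCast]
  exact congrArg Nat.cast (Nat.lor_assoc x y z)

lemma pv_shl_shl (a : Int) (m n : Nat) : (a <<< m) <<< n = a <<< (m + n) := by
  rw [Int.shiftLeft_eq, Int.shiftLeft_eq, Int.shiftLeft_eq, pow_add]; ring

-- one-step unfoldings (the matches bind their scrutinees, so simp alone cannot)
lemma pv_fe_none (cs : List Char) (j : Int) (hg : PySem.List.pyGet? cs j = none) :
    pvFindEnd cs j = none := by
  rw [pvFindEnd.eq_def]; split
  · rfl
  · next c hsome => rw [hg] at hsome; cases hsome

lemma pv_fe_stop (cs : List Char) (j : Int) (c : Char) (hg : PySem.List.pyGet? cs j = some c)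
    (hb : ¬ 95 ≤ c.toNat) : pvFindEnd cs j = some j := by
  rw [pvFindEnd.eq_def]; split
  · next hsome => rw [hg] at hsome; cases hsome
  · next c' hsome => rw [hg] at hsome; cases hsome; simp [hb]

lemma pv_fe_go (cs : List Char) (j : Int) (c : Char) (hg : PySem.List.pyGet? cs j = some c)
    (hb : 95 ≤ c.toNat) : pvFindEnd cs j = pvFindEnd cs (j + 1) := by
  rw [pvFindEnd.eq_def]; split
  · next hsome => rw [hg] at hsome; cases hsome
  · next c' hsome => rw [hg] at hsome; cases hsome; simp [hb]

lemma pv_fe_ge (cs : List Char) (j e : Int) (h : pvFindEnd cs j = some e) : j ≤ e := by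
  fun_induction pvFindEnd cs j with
  | case1 => simp at h
  | case2 =>
    rename_i ih
    have := ih h; omega
  | case3 =>
    simp only [Option.some.injEq] at h; omega

lemma pv_cd_stop (cs : List Char) (j lo r : Int) (h : ¬ lo ≤ j) :
    pvCombDown cs j lo r = some r := by
  rw [pvCombDown.eq_def, if_neg h]

lemma pv_cd_step (cs : List Char) (j lo r : Int) (h : lo ≤ j) :
    pvCombDown cs j lo r = match PySem.List.pyGet? cs j with
      | none => none
      | some c => pvCombDown cs (j - 1) lo (PySem.Int.bor (r <<< (5 : Nat)) (PySem.Int.band ((c.toNat : Int) - 63) 31)) := by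
  rw [pvCombDown.eq_def, if_pos h]

lemma pv_cd_nonneg (cs : List Char) (j lo r : Int) (hr : 0 ≤ r) {v : Int}
    (h : pvCombDown cs j lo r = some v) : 0 ≤ v := by
  fun_induction pvCombDown cs j lo r generalizing v with
  | case1 => simp_all
  | case2 =>
    rename_i ih
    exact ih (pv_bor_nonneg (pv_shl_nonneg 5 hr) (pv_band31_nonneg _)) h
  | case3 =>
    simp only [Option.some.injEq] at h; omega

-- lowering the stop bound of pass 2 by one appends one more combine step at the end
lemma pv_cd_lo (cs : List Char) (n : Nat) : ∀ (j lo r : Int), (j - lo).toNat = n → lo ≤ j →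
    pvCombDown cs j lo r = (pvCombDown cs j (lo + 1) r).bind (fun v =>
      (PySem.List.pyGet? cs lo).map (fun c =>
        PySem.Int.bor (v <<< (5 : Nat)) (PySem.Int.band ((c.toNat : Int) - 63) 31))) := by
  induction n with
  | zero =>
    intro j lo r hn hlo
    have hj : j = lo := by omega
    subst hj
    rw [pv_cd_step cs j j r le_rfl, pv_cd_stop cs j (j + 1) r (by omega)]
    cases hg : PySem.List.pyGet? cs j with
    | none => rfl
    | some c => simp [pv_cd_stop cs (j - 1) j _ (by omega)]
  | succ n ih =>
    intro j lo r hn hlo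
    have hjlo : lo < j := by omega
    rw [pv_cd_step cs j lo r hlo, pv_cd_step cs j (lo + 1) r (by omega)]
    cases hg : PySem.List.pyGet? cs j with
    | none => rfl
    | some c => exact ih (j - 1) lo _ (by omega) (by omega)

-- Main invariant: A's loop = B's find-the-end pass followed by the backwards combine,
-- OR-ed into A's accumulator at the current shift.
lemma pv_loop_eq (cs : List Char) (i r : Int) (s : Nat) (hr : 0 ≤ r) :
    pvDecodeA_loop cs i r s =
      (pvFindEnd cs i).bind (fun e => (pvCombDown cs e i 0).map
        (fun v => (e + 1, PySem.Int.bor r ((v : Int) <<< s)))) := by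
  fun_induction pvDecodeA_loop cs i r s with
  | case1 =>
    rename_i i r s hg
    rw [pv_fe_none cs i hg]; rfl
  | case2 =>
    rename_i i r s c hg b hb
    rw [pv_fe_stop cs i c hg (by omega)]
    simp only [Option.bind_some]
    rw [pv_cd_step cs i i 0 le_rfl]
    rw [hg]
    dsimp only
    rw [pv_cd_stop cs (i - 1) i _ (by omega)]
    simp only [Option.map_some]
    have h0 : ((0 : Int) <<< (5 : Nat)) = 0 := by decide
    rw [h0, pv_bor_zero_left]
  | case3 =>
    rename_i i r s c hg b hb ih
    have hc31 : 0 ≤ PySem.Int.band ((c.toNat : Int) - 63) 31 := pv_band31_nonneg _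
    have hr' : 0 ≤ PySem.Int.bor r ((PySem.Int.band ((c.toNat : Int) - 63) 31) <<< s) :=
      pv_bor_nonneg hr (pv_shl_nonneg s hc31)
    rw [ih hr', pv_fe_go cs i c hg (by omega)]
    cases hfe : pvFindEnd cs (i + 1) with
    | none => rfl
    | some e =>
      have hie : i + 1 ≤ e := pv_fe_ge cs (i + 1) e hfe
      simp only [Option.bind_some]
      rw [pv_cd_lo cs (e - i).toNat e i 0 rfl (by omega)]
      cases hcd : pvCombDown cs e (i + 1) 0 with
      | none => rfl
      | some v =>
        have hv : 0 ≤ v := pv_cd_nonneg cs e (i + 1) 0 le_rfl hcd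
        rw [hg]
        simp only [Option.bind_some, Option.map_some]
        have key : PySem.Int.bor r ((PySem.Int.bor (v <<< (5 : Nat)) (PySem.Int.band ((c.toNat : Int) - 63) 31)) <<< s)
            = PySem.Int.bor (PySem.Int.bor r ((PySem.Int.band ((c.toNat : Int) - 63) 31) <<< s)) (v <<< (s + 5)) := by
          rw [pv_bor_shl (pv_shl_nonneg 5 hv) hc31 s, pv_shl_shl, Nat.add_comm 5 s,
            PySem.Int.bor_comm (v <<< (s + 5)),
            ← pv_bor_assoc hr (pv_shl_nonneg s hc31) (pv_shl_nonneg (s + 5) hv)]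
        rw [key]

-- zigzag: Python's conditional `~(r >> 1) if r & 1 else r >> 1` equals `(r >> 1) ^ -(r & 1)`
lemma pv_not_eq (x : Int) : Int.not x = -x - 1 := by
  cases x with
  | ofNat n => simp [Int.not]; omega
  | negSucc n => simp [Int.not]

lemma pv_bxor_neg_one {x : Int} (hx : 0 ≤ x) : PySem.Int.bxor x (-1) = Int.not x := by
  rw [pv_not_eq]
  unfold PySem.Int.bxor
  rw [if_pos hx, if_neg (by norm_num)]
  simp [Int.toNat_of_nonneg hx]

lemma pv_zig_eq {r : Int} (hr : 0 ≤ r) :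
    pvZigA r = PySem.Int.bxor (r >>> (1 : Nat)) (-(PySem.Int.band r 1)) := by
  rw [pvZigA, PySem.Int.band_one]
  have h2 : (0 : Int) < 2 := by norm_num
  have h0 := PySem.Int.mod_nonneg r h2
  have h1 := PySem.Int.mod_lt r h2
  interval_cases h : (PySem.Int.mod r 2)
  · simp
  · rw [if_pos (by norm_num)]
    exact (pv_bxor_neg_one (Int.le_shiftRight_of_nonneg hr)).symm

-- ===== VERDICT (by name: the statement is the Claim_ definition above) =====
theorem decode_single_coordinate_spec : Claim_equal_decode_single_coordinate := by
  intro polyline index _hdom _hpre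
  unfold Spec_decode_single_coordinate decode_single_coordinate decode_single_coordinate_alt
  rw [pv_loop_eq polyline.toList index 0 0 le_rfl]
  cases hfe : pvFindEnd polyline.toList index with
  | none => rfl
  | some e =>
    simp only [Option.bind_some]
    cases hcd : pvCombDown polyline.toList e index 0 with
    | none => rfl
    | some v =>
      have hv : 0 ≤ v := pv_cd_nonneg polyline.toList e index 0 le_rfl hcd
      simp only [Option.map_some]
      rw [Int.shiftLeft_zero, pv_bor_zero_left, pv_zig_eq hv]
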